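-- pv_equiv track=rewrite | github.com/longphan04/library_service | ai_engine/src/data_processor.py | extract_best_identifier
-- ===== SOURCE A (Python) =====
-- def extract_best_identifier(identifiers):
--     """
--     Lấy identifier và type gốc (Ưu tiên ISBN 13 -> 10 -> Khác)
--     """
--     if not identifiers:
--         return "", ""
--
--     # 1. Ưu tiên ISBN_13
--     for item in identifiers:
--         if item.get('type') == 'ISBN_13':
--             return item.get('identifier'), "ISBN_13"
--
--     # 2. Ưu tiên ISBN_10
--     for item in identifiers:
--         if item.get('type') == 'ISBN_10':
--             return item.get('identifier'), "ISBN_10"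
--
--     # 3. Lấy bất kỳ loại nào khác
--     first_item = identifiers[0]
--     return first_item.get('identifier', ""), first_item.get('type', "UNKNOWN")
-- ===== SOURCE B (Python) =====
-- _RANK = {'ISBN_13': 0, 'ISBN_10': 1}
--
-- def extract_best_identifier(identifiers):
--     if not identifiers:
--         return "", ""
--     best = min(identifiers, key=lambda it: _RANK.get(it.get('type'), 2))
--     t = best.get('type')
--     if t in ('ISBN_13', 'ISBN_10'):
--         return best.get('identifier'), t
--     return best.get('identifier', ""), best.get('type', "UNKNOWN")
-- ===== Notes on version B (the rewrite author's own statement) =====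
-- stated objective: simpler
-- what changed: Replaced A's two sequential prioritized scans plus fallback by one stable min-by-rank pass (rank ISBN_13=0, ISBN_10=1, other=2) followed by a branch on the winner's type.
-- outside the precondition, e.g. on extract_best_identifier([{'type': 'ISBN_13'}]): A returns (None, 'ISBN_13'), B returns (None, 'ISBN_13')
import Mathlib
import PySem

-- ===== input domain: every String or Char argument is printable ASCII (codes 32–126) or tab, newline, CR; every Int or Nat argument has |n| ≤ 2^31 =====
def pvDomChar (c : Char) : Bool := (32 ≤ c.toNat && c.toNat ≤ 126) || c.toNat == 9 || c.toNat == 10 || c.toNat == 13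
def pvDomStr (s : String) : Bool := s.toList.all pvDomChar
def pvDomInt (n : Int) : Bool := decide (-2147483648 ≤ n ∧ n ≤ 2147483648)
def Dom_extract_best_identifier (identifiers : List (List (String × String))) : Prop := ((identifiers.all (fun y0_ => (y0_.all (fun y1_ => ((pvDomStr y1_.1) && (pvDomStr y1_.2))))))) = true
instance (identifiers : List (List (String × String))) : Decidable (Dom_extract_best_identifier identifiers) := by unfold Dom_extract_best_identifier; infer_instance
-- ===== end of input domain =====

-- B replaces A's two sequential prioritized scans by one stable min-by-rank pass (simpler decomposition, same cost).
-- Equivalence is about the RETURN value; neither program mutates its argument.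

-- dict primitive shared by both ports: d.get(k) / d.get(k, dflt) on an association list (first match)
def pvGet? (d : List (String × String)) (k : String) : Option String :=
  (d.find? (fun p => p.1 == k)).map (·.2)

def pvGetD (d : List (String × String)) (k dflt : String) : String :=
  (pvGet? d k).getD dflt

-- ===== PORT A =====
-- first 'for' loop of A: return item.get('identifier') at the first item with type ISBN_13.
-- Inside Pre_ that item has the 'identifier' key, so the port writes the lookup with default "" (exact on Pre_).
def loopA13 : List (List (String × String)) → Option String
  | [] => none
  | item :: rest =>
    if pvGet? item "type" = some "ISBN_13" then some (pvGetD item "identifier" "") else loopA13 rest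

-- second 'for' loop of A, likewise for ISBN_10
def loopA10 : List (List (String × String)) → Option String
  | [] => none
  | item :: rest =>
    if pvGet? item "type" = some "ISBN_10" then some (pvGetD item "identifier" "") else loopA10 rest

def extract_best_identifier (identifiers : List (List (String × String))) : String × String :=
  match identifiers with
  | [] => ("", "")
  | first :: _ =>
    match loopA13 identifiers with
    | some s => (s, "ISBN_13")
    | none =>
      match loopA10 identifiers with
      | some s => (s, "ISBN_10")
      | none => (pvGetD first "identifier" "", pvGetD first "type" "UNKNOWN")

-- ===== PORT B =====
-- _RANK.get(it.get('type'), 2)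
def rankB (d : List (String × String)) : Nat :=
  match pvGet? d "type" with
  | some "ISBN_13" => 0
  | some "ISBN_10" => 1
  | _ => 2

-- min(identifiers, key=…): Python's min keeps the FIRST element of minimal key (strict '<' replacement)
def minB (b : List (String × String)) (l : List (List (String × String))) : List (String × String) :=
  l.foldl (fun acc d => if rankB d < rankB acc then d else acc) b

def extract_best_identifier_alt (identifiers : List (List (String × String))) : String × String :=
  match identifiers with
  | [] => ("", "")
  | first :: rest =>
    let best := minB first rest
    let t := pvGet? best "type"
    if t = some "ISBN_13" ∨ t = some "ISBN_10" then
      (pvGetD best "identifier" "", t.getD "")   -- best.get('identifier') exists inside Pre_; default "" is exact there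
    else
      (pvGetD best "identifier" "", pvGetD best "type" "UNKNOWN")

-- ===== PRECONDITION & SPEC =====
-- Pre_ excludes exactly the inputs on which A (and B alike) return None instead of a string — the first
-- ISBN_13 item (or, failing that, the first ISBN_10 item) lacking the 'identifier' key — since None is
-- not a value of the declared String type.
def Pre_extract_best_identifier (identifiers : List (List (String × String))) : Prop :=
  (match identifiers.find? (fun d => pvGet? d "type" == some "ISBN_13") with
   | some d => d.any (·.1 == "identifier")
   | none =>
     match identifiers.find? (fun d => pvGet? d "type" == some "ISBN_10") with
     | some d => d.any (·.1 == "identifier")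
     | none => true) = true

instance (identifiers : List (List (String × String))) : Decidable (Pre_extract_best_identifier identifiers) := by
  unfold Pre_extract_best_identifier; infer_instance

def pvWitness_extract_best_identifier : (List (List (String × String))) :=
  [[("type", "ISBN_13"), ("identifier", "9781234567890")]]

def Spec_extract_best_identifier (identifiers : List (List (String × String))) (out : String × String) : Prop := out = extract_best_identifier_alt identifiers
instance (identifiers : List (List (String × String))) (out : String × String) : Decidable (Spec_extract_best_identifier identifiers out) := by unfold Spec_extract_best_identifier; infer_instance

-- ===== CLAIM (what is proved, stated in full; the proofs are below) =====
def Claim_equal_extract_best_identifier : Prop := ∀ (identifiers : List (List (String × String))), Dom_extract_best_identifier identifiers → Pre_extract_best_identifier identifiers → Spec_extract_best_identifier identifiers (extract_best_identifier identifiers)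

-- ===== LEMMAS AND PROOFS =====

theorem find?_cons_none {α : Type} (p : α → Bool) (a : α) (l : List α) :
    ((a :: l).find? p = none) ↔ (p a = false ∧ l.find? p = none) := by
  by_cases h : p a
  · rw [List.find?_cons_of_pos h]; simp [h]
  · rw [List.find?_cons_of_neg (by simpa using h)]; simp [h]

-- cons-step lemmas for find? specialised to the two predicates (fixes the predicate for rw)
theorem fcp13 {d : List (String × String)} (l : List (List (String × String)))
    (h : pvGet? d "type" = some "ISBN_13") :
    (d :: l).find? (fun x => pvGet? x "type" == some "ISBN_13") = some d :=
  List.find?_cons_of_pos (by simpa using h)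

theorem fcn13 {d : List (String × String)} (l : List (List (String × String)))
    (h : ¬ pvGet? d "type" = some "ISBN_13") :
    (d :: l).find? (fun x => pvGet? x "type" == some "ISBN_13")
      = l.find? (fun x => pvGet? x "type" == some "ISBN_13") :=
  List.find?_cons_of_neg (by simpa using h)

theorem fcp10 {d : List (String × String)} (l : List (List (String × String)))
    (h : pvGet? d "type" = some "ISBN_10") :
    (d :: l).find? (fun x => pvGet? x "type" == some "ISBN_10") = some d :=
  List.find?_cons_of_pos (by simpa using h)

theorem fcn10 {d : List (String × String)} (l : List (List (String × String)))
    (h : ¬ pvGet? d "type" = some "ISBN_10") :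
    (d :: l).find? (fun x => pvGet? x "type" == some "ISBN_10")
      = l.find? (fun x => pvGet? x "type" == some "ISBN_10") :=
  List.find?_cons_of_neg (by simpa using h)

-- A's loops compute find? composed with the identifier lookup
theorem loopA13_eq_find (l : List (List (String × String))) :
    loopA13 l = (l.find? (fun d => pvGet? d "type" == some "ISBN_13")).map (fun d => pvGetD d "identifier" "") := by
  induction l with
  | nil => rfl
  | cons d rest ih =>
    by_cases h : pvGet? d "type" = some "ISBN_13"
    · rw [fcp13 rest h]; simp only [loopA13, if_pos h, Option.map_some]
    · rw [fcn13 rest h]; simp only [loopA13, if_neg h, ih]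

theorem loopA10_eq_find (l : List (List (String × String))) :
    loopA10 l = (l.find? (fun d => pvGet? d "type" == some "ISBN_10")).map (fun d => pvGetD d "identifier" "") := by
  induction l with
  | nil => rfl
  | cons d rest ih =>
    by_cases h : pvGet? d "type" = some "ISBN_10"
    · rw [fcp10 rest h]; simp only [loopA10, if_pos h, Option.map_some]
    · rw [fcn10 rest h]; simp only [loopA10, if_neg h, ih]

theorem rankB_eq_zero (d : List (String × String)) :
    rankB d = 0 ↔ pvGet? d "type" = some "ISBN_13" := by
  unfold rankB
  rcases h : pvGet? d "type" with _ | s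
  · simp
  · by_cases h13 : s = "ISBN_13"
    · simp [h13]
    · by_cases h10 : s = "ISBN_10" <;> simp [h13, h10]

theorem rankB_eq_one (d : List (String × String)) :
    rankB d = 1 ↔ pvGet? d "type" = some "ISBN_10" := by
  unfold rankB
  rcases h : pvGet? d "type" with _ | s
  · simp
  · by_cases h13 : s = "ISBN_13"
    · simp [h13]
    · by_cases h10 : s = "ISBN_10" <;> simp [h13, h10]

theorem rankB_le_two (d : List (String × String)) : rankB d ≤ 2 := by
  unfold rankB; split <;> omega

-- the fold never replaces an accumulator of minimal rank 0
theorem minB_rank0 (b : List (String × String)) (l : List (List (String × String)))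
    (hb : rankB b = 0) : minB b l = b := by
  induction l generalizing b with
  | nil => rfl
  | cons d rest ih =>
    simp only [minB, List.foldl_cons]
    rw [hb]
    simp only [Nat.not_lt_zero, if_false]
    exact ih b hb

-- nor a rank-1 accumulator when no rank-0 item follows
theorem minB_rank1 (b : List (String × String)) (l : List (List (String × String)))
    (hb : rankB b = 1)
    (h13 : l.find? (fun x => pvGet? x "type" == some "ISBN_13") = none) :
    minB b l = b := by
  induction l generalizing b with
  | nil => rfl
  | cons d rest ih =>
    rw [find?_cons_none] at h13
    have hd : rankB d ≠ 0 := fun h0 => by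
      have := (rankB_eq_zero d).mp h0
      simp [this] at h13
    simp only [minB, List.foldl_cons]
    rw [hb, if_neg (by omega)]
    exact ih b hb h13.2

-- nor a rank-2 accumulator when nothing of rank 0 or 1 follows
theorem minB_rank2 (b : List (String × String)) (l : List (List (String × String)))
    (h13 : l.find? (fun x => pvGet? x "type" == some "ISBN_13") = none)
    (h10 : l.find? (fun x => pvGet? x "type" == some "ISBN_10") = none) :
    minB b l = b := by
  induction l generalizing b with
  | nil => rfl
  | cons d rest ih =>
    rw [find?_cons_none] at h13 h10
    have h0 : rankB d ≠ 0 := fun h => by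
      have := (rankB_eq_zero d).mp h; simp [this] at h13
    have h1 : rankB d ≠ 1 := fun h => by
      have := (rankB_eq_one d).mp h; simp [this] at h10
    have hble := rankB_le_two b
    simp only [minB, List.foldl_cons]
    rw [if_neg (by omega)]
    exact ih b h13.2 h10.2

-- the fold yields the first ISBN_13 item when there is one
theorem minB_find13 (b : List (String × String)) (l : List (List (String × String))) (d : List (String × String))
    (h : (b :: l).find? (fun x => pvGet? x "type" == some "ISBN_13") = some d) :
    minB b l = d := by
  induction l generalizing b with
  | nil =>
    by_cases hb : pvGet? b "type" = some "ISBN_13"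
    · rw [fcp13 [] hb] at h; simp at h; subst h; rfl
    · rw [fcn13 [] hb] at h; simp at h
  | cons d' rest ih =>
    by_cases hb : pvGet? b "type" = some "ISBN_13"
    · rw [fcp13 _ hb] at h
      simp at h; subst h
      exact minB_rank0 b (d' :: rest) ((rankB_eq_zero b).mpr hb)
    · rw [fcn13 _ hb] at h
      have hb0 : rankB b ≠ 0 := fun h0 => hb ((rankB_eq_zero b).mp h0)
      simp only [minB, List.foldl_cons]
      by_cases hd' : pvGet? d' "type" = some "ISBN_13"
      · have hd0 : rankB d' = 0 := (rankB_eq_zero d').mpr hd'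
        rw [if_pos (by omega)]
        rw [fcp13 _ hd'] at h
        simp at h; subst h
        exact minB_rank0 d' rest hd0
      · by_cases hlt : rankB d' < rankB b
        · rw [if_pos hlt]
          exact ih d' h
        · rw [if_neg hlt]
          refine ih b ?_
          rw [fcn13 _ hb, ← fcn13 rest hd']
          exact h

-- the fold yields the first ISBN_10 item when there is no ISBN_13 item
theorem minB_find10 (b : List (String × String)) (l : List (List (String × String))) (d : List (String × String))
    (h13 : (b :: l).find? (fun x => pvGet? x "type" == some "ISBN_13") = none)
    (h10 : (b :: l).find? (fun x => pvGet? x "type" == some "ISBN_10") = some d) :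
    minB b l = d := by
  induction l generalizing b with
  | nil =>
    by_cases hb : pvGet? b "type" = some "ISBN_10"
    · rw [fcp10 [] hb] at h10; simp at h10; subst h10; rfl
    · rw [fcn10 [] hb] at h10; simp at h10
  | cons d' rest ih =>
    rw [find?_cons_none] at h13
    have hb13 : ¬ pvGet? b "type" = some "ISBN_13" := by
      intro hh; simp [hh] at h13
    by_cases hb : pvGet? b "type" = some "ISBN_10"
    · rw [fcp10 _ hb] at h10
      simp at h10; subst h10
      exact minB_rank1 b (d' :: rest) ((rankB_eq_one b).mpr hb) h13.2
    · rw [fcn10 _ hb] at h10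
      have hb2 : rankB b = 2 := by
        have h0 : rankB b ≠ 0 := fun h => hb13 ((rankB_eq_zero b).mp h)
        have h1 : rankB b ≠ 1 := fun h => hb ((rankB_eq_one b).mp h)
        have := rankB_le_two b; omega
      have h13' := h13.2
      rw [find?_cons_none] at h13'
      have hd'13 : ¬ pvGet? d' "type" = some "ISBN_13" := by
        intro hh; simp [hh] at h13'
      simp only [minB, List.foldl_cons]
      by_cases hd' : pvGet? d' "type" = some "ISBN_10"
      · have hd1 : rankB d' = 1 := (rankB_eq_one d').mpr hd'
        rw [if_pos (by omega)]
        rw [fcp10 _ hd'] at h10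
        simp at h10; subst h10
        exact minB_rank1 d' rest hd1 h13'.2
      · have hd2 : rankB d' = 2 := by
          have h0 : rankB d' ≠ 0 := fun h => hd'13 ((rankB_eq_zero d').mp h)
          have h1 : rankB d' ≠ 1 := fun h => hd' ((rankB_eq_one d').mp h)
          have := rankB_le_two d'; omega
        rw [if_neg (by omega)]
        rw [fcn10 _ hd'] at h10
        refine ih b ?_ ?_
        · rw [find?_cons_none]
          refine ⟨by simpa using hb13, h13'.2⟩
        · rw [fcn10 _ hb]
          exact h10

-- ===== VERDICT (by name: the statement is the Claim_ definition above) =====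
theorem extract_best_identifier_spec : Claim_equal_extract_best_identifier := by
  intro ids _hDom _hPre
  unfold Spec_extract_best_identifier
  match ids with
  | [] => rfl
  | first :: rest =>
    simp only [extract_best_identifier, extract_best_identifier_alt,
      loopA13_eq_find, loopA10_eq_find]
    rcases h13 : (first :: rest).find? (fun x => pvGet? x "type" == some "ISBN_13") with _ | d13
    · rcases h10 : (first :: rest).find? (fun x => pvGet? x "type" == some "ISBN_10") with _ | d10
      · -- neither ISBN_13 nor ISBN_10 anywhere: best = first, 'other' branch
        have h13' := h13; have h10' := h10
        rw [find?_cons_none] at h13' h10'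
        have hmin : minB first rest = first := minB_rank2 first rest h13'.2 h10'.2
        have hf13 : ¬ pvGet? first "type" = some "ISBN_13" := by
          intro hh; simp [hh] at h13'
        have hf10 : ¬ pvGet? first "type" = some "ISBN_10" := by
          intro hh; simp [hh] at h10'
        simp [hmin, hf13, hf10]
      · -- first ISBN_10 item d10 wins
        have hmin : minB first rest = d10 := minB_find10 first rest d10 h13 h10
        have ht : pvGet? d10 "type" = some "ISBN_10" := by
          have := List.find?_some h10; simpa using this
        simp [hmin, ht]
    · -- first ISBN_13 item d13 wins
      have hmin : minB first rest = d13 := minB_find13 first rest d13 h13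
      have ht : pvGet? d13 "type" = some "ISBN_13" := by
        have := List.find?_some h13; simpa using this
      simp [hmin, ht]
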